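-- pv_equiv track=rewrite | github.com/sihechen0530/reben-training-scripts | scripts/diagnose/visualize_success_failures.py | get_band_wavelengths
-- ===== SOURCE A (Python) =====
-- from typing import Optional, List, Tuple, Dict
--
-- S2_WAVELENGTHS = {
--     "B02": 490,   # Blue
--     "B03": 560,   # Green
--     "B04": 665,   # Red
--     "B05": 705,   # Red Edge 1
--     "B06": 740,   # Red Edge 2
--     "B07": 783,   # Red Edge 3
--     "B08": 842,   # NIR
--     "B8A": 865,   # Red Edge 4
--     "B11": 1610,  # SWIR 1
--     "B12": 2190,  # SWIR 2
-- }
--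
-- S1_WAVELENGTHS = {
--     "VV": 0,  # C-band SAR
--     "VH": 0,
-- }
--
-- def get_band_wavelengths(band_names: List[str]) -> List[float]:
--     """Get wavelengths for a list of band names."""
--     wavelengths = []
--     for band in band_names:
--         if band in S2_WAVELENGTHS:
--             wavelengths.append(S2_WAVELENGTHS[band])
--         elif band in S1_WAVELENGTHS:
--             wavelengths.append(3000 + len([w for w in wavelengths if w > 2000]))
--         else:
--             wavelengths.append(0)
--     return wavelengths
-- ===== SOURCE B (Python) =====
-- from typing import List
--
-- S2_WAVELENGTHS = {
--     "B02": 490, "B03": 560, "B04": 665, "B05": 705, "B06": 740,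
--     "B07": 783, "B08": 842, "B8A": 865, "B11": 1610, "B12": 2190,
-- }
--
-- S1_WAVELENGTHS = {"VV": 0, "VH": 0}
--
--
-- def get_band_wavelengths(band_names: List[str]) -> List[float]:
--     """Get wavelengths for a list of band names (table-driven, two passes)."""
--     # Pass 1: prefix counts of "heavy" bands (B12 or SAR) — exactly the
--     # bands whose emitted wavelength exceeds 2000.
--     prefix = []
--     c = 0
--     for band in band_names:
--         prefix.append(c)
--         if band == "B12" or band in S1_WAVELENGTHS:
--             c += 1
--     # Pass 2: table-driven emission.
--     return [
--         S2_WAVELENGTHS[band] if band in S2_WAVELENGTHS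
--         else (3000 + p if band in S1_WAVELENGTHS else 0)
--         for band, p in zip(band_names, prefix)
--     ]
-- ===== Notes on version B (the rewrite author's own statement) =====
-- stated objective: alternative
-- what changed: B splits A's single loop (which rescans the already-built output list on every SAR band) into two passes: a prefix-count table of heavy bands (B12 or SAR) computed from the names alone, and a table-driven emission pass; the per-iteration rescan disappears.
import Mathlib
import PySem

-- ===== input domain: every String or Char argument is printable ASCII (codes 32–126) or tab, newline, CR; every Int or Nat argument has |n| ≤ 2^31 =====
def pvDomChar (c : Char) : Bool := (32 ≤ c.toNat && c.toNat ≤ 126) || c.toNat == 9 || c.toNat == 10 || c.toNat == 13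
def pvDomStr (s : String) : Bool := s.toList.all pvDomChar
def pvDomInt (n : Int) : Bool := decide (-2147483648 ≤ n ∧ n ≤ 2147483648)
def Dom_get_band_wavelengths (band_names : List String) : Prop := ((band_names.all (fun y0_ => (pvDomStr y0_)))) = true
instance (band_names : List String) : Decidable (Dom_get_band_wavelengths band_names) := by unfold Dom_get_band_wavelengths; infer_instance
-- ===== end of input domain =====

-- B replaces A's per-iteration rescan of the built list with a precomputed prefix-count
-- table over the names plus a table-driven emission pass (objective: alternative decomposition).


-- ===== PORT A =====
def S2_WAVELENGTHS : PySem.Dict String Int := PySem.Dict.ofList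
  [("B02",490),("B03",560),("B04",665),("B05",705),("B06",740),
   ("B07",783),("B08",842),("B8A",865),("B11",1610),("B12",2190)]

def S1_WAVELENGTHS : PySem.Dict String Int := PySem.Dict.ofList [("VV",0),("VH",0)]

-- one iteration of A's for-loop (membership test + lookup done as one match on get?)
def stepA (wavelengths : List Int) (band : String) : List Int :=
  match S2_WAVELENGTHS.get? band with
  | some v => wavelengths ++ [v]
  | none =>
    if S1_WAVELENGTHS.contains band then
      wavelengths ++ [3000 + ((wavelengths.filter (fun w => decide (2000 < w))).length : Int)]
    else
      wavelengths ++ [0]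

def get_band_wavelengths (band_names : List String) : List Int :=
  band_names.foldl stepA []

-- ===== PORT B =====
def heavyB (band : String) : Bool := band == "B12" || S1_WAVELENGTHS.contains band

-- pass 1: prefix counts of heavy bands, carrying the running counter c
def prefixesB : List String → Int → List Int
  | [], _ => []
  | b :: bs, c => c :: prefixesB bs (if heavyB b then c + 1 else c)

-- pass 2: table-driven emission for one position
def emitOne (band : String) (p : Int) : Int :=
  match S2_WAVELENGTHS.get? band with
  | some v => v
  | none => if S1_WAVELENGTHS.contains band then 3000 + p else 0

def get_band_wavelengths_alt (band_names : List String) : List Int :=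
  List.zipWith emitOne band_names (prefixesB band_names 0)

-- ===== PRECONDITION & SPEC =====
def Spec_get_band_wavelengths (band_names : List String) (out : List Int) : Prop := out = get_band_wavelengths_alt band_names
instance (band_names : List String) (out : List Int) : Decidable (Spec_get_band_wavelengths band_names out) := by unfold Spec_get_band_wavelengths; infer_instance

-- ===== CLAIM (what is proved, stated in full; the proofs are below) =====
def Claim_equal_get_band_wavelengths : Prop := ∀ (band_names : List String), Dom_get_band_wavelengths band_names → Spec_get_band_wavelengths band_names (get_band_wavelengths band_names)

-- ===== LEMMAS AND PROOFS =====

-- a looked-up S2 value exceeds 2000 exactly for the heavy bands (B12; S1 keys never occur in S2)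
theorem s2_value_heavy (band : String) (v : Int) (h : S2_WAVELENGTHS.get? band = some v) :
    decide (2000 < v) = heavyB band := by
  simp only [PySem.Dict.get?] at h
  obtain ⟨⟨k, w⟩, hf, hv⟩ := Option.map_eq_some_iff.mp h
  have hmem := List.mem_of_find?_eq_some hf
  have hk := List.find?_some hf
  simp only [beq_iff_eq] at hk
  subst hk hv
  have hitems : S2_WAVELENGTHS.items =
      [("B02",(490:Int)),("B03",560),("B04",665),("B05",705),("B06",740),
       ("B07",783),("B08",842),("B8A",865),("B11",1610),("B12",2190)] := by rfl
  rw [hitems] at hmem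
  fin_cases hmem <;> rfl

theorem s2_none_not_b12 (band : String) (h : S2_WAVELENGTHS.get? band = none) :
    (band == "B12") = false := by
  by_contra hne
  have hb : band = "B12" := by
    cases hb : (band == "B12") with
    | false => exact absurd hb hne
    | true => exact beq_iff_eq.mp hb
  subst hb
  exact absurd h (by decide)

-- loop invariant: A's fold from an accumulator whose heavy count is c equals
-- acc ++ B's table-driven emission started at prefix counter c
theorem loop_eq (bands : List String) : ∀ (acc : List Int) (c : Int), 0 ≤ c →
    ((acc.filter (fun w => decide (2000 < w))).length : Int) = c →
    bands.foldl stepA acc = acc ++ List.zipWith emitOne bands (prefixesB bands c) := by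
  induction bands with
  | nil => intro acc c _ _; simp [prefixesB]
  | cons b bs ih =>
    intro acc c hc hcount
    have hfold : (b :: bs).foldl stepA acc = bs.foldl stepA (stepA acc b) := rfl
    have hzip : List.zipWith emitOne (b :: bs) (prefixesB (b :: bs) c)
        = emitOne b c :: List.zipWith emitOne bs (prefixesB bs (if heavyB b then c + 1 else c)) := rfl
    rw [hfold, hzip]
    have hstep : stepA acc b = acc ++ [emitOne b c] := by
      cases h : S2_WAVELENGTHS.get? b with
      | some v => simp [stepA, emitOne, h]
      | none => simp only [stepA, emitOne, h, hcount]; split <;> rfl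
    have hnew : (((acc ++ [emitOne b c]).filter (fun w => decide (2000 < w))).length : Int)
        = (if heavyB b then c + 1 else c) := by
      have hflag : (decide (2000 < emitOne b c)) = heavyB b := by
        cases h : S2_WAVELENGTHS.get? b with
        | some v => simpa [emitOne, h] using s2_value_heavy b v h
        | none =>
          by_cases hs : S1_WAVELENGTHS.contains b
          · have : (2000 : Int) < 3000 + c := by omega
            simp [emitOne, heavyB, h, hs, this]
          · simp [emitOne, heavyB, h, hs, s2_none_not_b12 b h]
      rw [List.filter_append, List.length_append]
      cases hh : heavyB b with
      | true => rw [hh] at hflag; simp [List.filter, hflag, hcount]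
      | false => rw [hh] at hflag; simp [List.filter, hflag, hcount]
    rw [hstep, ih (acc ++ [emitOne b c]) (if heavyB b then c + 1 else c)
        (by split <;> omega) hnew]
    simp

-- ===== VERDICT (by name: the statement is the Claim_ definition above) =====
theorem get_band_wavelengths_spec : Claim_equal_get_band_wavelengths := by
  intro band_names _
  unfold Spec_get_band_wavelengths get_band_wavelengths get_band_wavelengths_alt
  simpa using loop_eq band_names [] 0 le_rfl (by simp)
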